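-- pv_equiv track=rewrite | github.com/aduriseti/nemotron | reasoners/bit_manipulation_solver/bit_solver_tt.py | _canonical_perms
-- ===== SOURCE A (Python) =====
-- from itertools import permutations
--
-- def _canonical_perms(tt: int, arity: int) -> list:
--     """Return one representative permutation per distinct permuted truth table.
--
--     Avoids redundant transform assignments for symmetric/partially-symmetric
--     functions (e.g., XOR(A,B) == XOR(B,A) so only one ordering is needed).
--     """
--     seen: dict[int, tuple] = {}
--     for perm in permutations(range(arity)):
--         new_tt = 0
--         for combo in range(1 << arity):
--             inputs = [(combo >> i) & 1 for i in range(arity)]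
--             permuted = [inputs[perm[i]] for i in range(arity)]
--             orig_idx = sum(permuted[i] << i for i in range(arity))
--             bit = (tt >> orig_idx) & 1
--             new_tt |= bit << combo
--         if new_tt not in seen:
--             seen[new_tt] = perm
--     return list(seen.values())
-- ===== SOURCE B (Python) =====
-- from itertools import permutations
--
--
-- def _canonical_perms(tt: int, arity: int) -> list:
--     """Recursive Shannon expansion: the permuted truth table is built by
--     divide-and-conquer on the highest input variable of the source table,
--     instead of A's flat per-output-bit gather loop; dedup via set + list."""
--
--     def cof(t, v, a, b):
--         # truth table of arity a-1 obtained by fixing input variable v to b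
--         r = 0
--         for j in range(1 << (a - 1)):
--             src = (j & ((1 << v) - 1)) | (b << v) | ((j >> v) << (v + 1))
--             r |= ((t >> src) & 1) << j
--         return r
--
--     def apply(t, perm):
--         a = len(perm)
--         if a == 0:
--             return t & 1
--         v = perm.index(a - 1)
--         rest = perm[:v] + perm[v + 1:]
--         half = 1 << (a - 1)
--         return apply(cof(t, v, a, 0), rest) | (apply(cof(t, v, a, 1), rest) << half)
--
--     seen = set()
--     out = []
--     for perm in permutations(range(arity)):
--         new_tt = apply(tt, perm)
--         if new_tt not in seen:
--             seen.add(new_tt)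
--             out.append(perm)
--     return out
-- ===== Notes on version B (the rewrite author's own statement) =====
-- stated objective: alternative
-- what changed: B computes each permuted truth table by recursive Shannon expansion (find the position of the highest variable in the permutation, extract the two cofactors of tt with that variable fixed to 0/1, recurse on the one-smaller permutation and concatenate the two half-tables), instead of A's flat loop over all 2^arity output bits gathering one tt bit each through inputs/permuted index lists; dedup uses a set plus an output list instead of an insertion-ordered dict.
import Mathlib
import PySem

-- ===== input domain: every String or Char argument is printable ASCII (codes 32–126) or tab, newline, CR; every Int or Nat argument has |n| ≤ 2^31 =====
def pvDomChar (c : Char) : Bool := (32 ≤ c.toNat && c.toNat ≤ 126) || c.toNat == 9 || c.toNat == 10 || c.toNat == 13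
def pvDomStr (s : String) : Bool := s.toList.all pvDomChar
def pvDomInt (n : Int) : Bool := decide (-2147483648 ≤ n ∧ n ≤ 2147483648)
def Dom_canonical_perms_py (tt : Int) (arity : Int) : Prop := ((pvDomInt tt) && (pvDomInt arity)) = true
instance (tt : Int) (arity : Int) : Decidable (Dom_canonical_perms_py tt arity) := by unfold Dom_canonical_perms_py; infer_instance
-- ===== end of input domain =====

-- B builds each permuted truth table by recursive Shannon expansion (split on the position of
-- the highest variable in the permutation, extract the two cofactors of tt, recurse on the
-- one-smaller permutation and concatenate the two half-tables) instead of A's flat loop over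
-- all output bits gathering through inputs/permuted lists; dedup via set + output list
-- instead of an insertion-ordered dict (objective: alternative, same cost).

-- ===== PORT A =====
-- inner loop of A: new_tt for one perm
def pvA_newtt (tt : Int) (arity : Int) (perm : List Int) : Int :=
  (PySem.List.pyRange 0 ((1:Int) <<< arity.toNat) 1).foldl
    (fun new_tt combo =>
      let inputs : List Int :=
        (PySem.List.pyRange 0 arity 1).map (fun i => PySem.Int.band (combo >>> i.toNat) 1)
      let permuted : List Int :=
        (PySem.List.pyRange 0 arity 1).map
          (fun i => PySem.List.pyGetD inputs (PySem.List.pyGetD perm i 0) 0)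
      let orig_idx : Int :=
        ((PySem.List.pyRange 0 arity 1).map
          (fun i => PySem.List.pyGetD permuted i 0 <<< i.toNat)).sum
      let bit : Int := PySem.Int.band (tt >>> orig_idx.toNat) 1
      PySem.Int.bor new_tt (bit <<< combo.toNat)) 0

def canonical_perms_py (tt : Int) (arity : Int) : List (List Int) :=
  ((PySem.List.permutations (PySem.List.pyRange 0 arity 1)
      (PySem.List.pyRange 0 arity 1).length).foldl
    (fun (seen : PySem.Dict Int (List Int)) perm =>
      if seen.contains (pvA_newtt tt arity perm) then seen
      else seen.insert (pvA_newtt tt arity perm) perm)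
    PySem.Dict.empty).values

-- ===== PORT B =====
-- cof(t, v, a, b): truth table of arity a-1 obtained by fixing input variable v to b
def pvB_cof (t : Int) (v : Int) (a : Int) (b : Int) : Int :=
  (PySem.List.pyRange 0 ((1:Int) <<< (a - 1).toNat) 1).foldl
    (fun r j =>
      let src : Int :=
        PySem.Int.bor
          (PySem.Int.bor (PySem.Int.band j (((1:Int) <<< v.toNat) - 1)) (b <<< v.toNat))
          ((j >>> v.toNat) <<< (v + 1).toNat)
      PySem.Int.bor r (PySem.Int.band (t >>> src.toNat) 1 <<< j.toNat)) 0

-- apply(t, perm): recursion on len(perm) (the Nat index is the length of perm at each call)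
def pvB_applyAux : Nat → Int → List Int → Int
  | 0, t, _ => PySem.Int.band t 1
  | n+1, t, perm =>
    let a : Int := perm.length
    let v : Int := (((PySem.List.index? perm (a - 1)).getD 0 : Nat) : Int)
    let rest : List Int :=
      PySem.List.slice perm none (some v) ++ PySem.List.slice perm (some (v + 1)) none
    let half : Int := (1:Int) <<< (a - 1).toNat
    PySem.Int.bor (pvB_applyAux n (pvB_cof t v a 0) rest)
      (pvB_applyAux n (pvB_cof t v a 1) rest <<< half.toNat)

def pvB_apply (t : Int) (perm : List Int) : Int := pvB_applyAux perm.length t perm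

def canonical_perms_py_alt (tt : Int) (arity : Int) : List (List Int) :=
  ((PySem.List.permutations (PySem.List.pyRange 0 arity 1)
      (PySem.List.pyRange 0 arity 1).length).foldl
    (fun (st : PySem.Set Int × List (List Int)) perm =>
      if PySem.Set.contains st.1 (pvB_apply tt perm) then st
      else (PySem.Set.add st.1 (pvB_apply tt perm), st.2 ++ [perm]))
    (PySem.Set.empty, [])).2

-- ===== PRECONDITION & SPEC =====
-- Pre_ excludes exactly arity < 0, where Python's `1 << arity` raises ValueError in A.
def Pre_canonical_perms_py (tt : Int) (arity : Int) : Prop := 0 ≤ arity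
instance (tt : Int) (arity : Int) : Decidable (Pre_canonical_perms_py tt arity) := by
  unfold Pre_canonical_perms_py; infer_instance
def pvWitness_canonical_perms_py : Int × Int := (6, 2)

def Spec_canonical_perms_py (tt : Int) (arity : Int) (out : List (List Int)) : Prop :=
  out = canonical_perms_py_alt tt arity
instance (tt : Int) (arity : Int) (out : List (List Int)) :
    Decidable (Spec_canonical_perms_py tt arity out) := by
  unfold Spec_canonical_perms_py; infer_instance

-- ===== CLAIM (what is proved, stated in full; the proofs are below) =====
def Claim_equal_canonical_perms_py : Prop :=
  ∀ (tt : Int) (arity : Int), Dom_canonical_perms_py tt arity →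
    Pre_canonical_perms_py tt arity →
    Spec_canonical_perms_py tt arity (canonical_perms_py tt arity)

-- ===== LEMMAS AND PROOFS =====

-- Nat-level views
def pvBitN (k j : Nat) : Nat := (k >>> j) &&& 1
def pvBitT (tt : Int) (j : Nat) : Nat := (PySem.Int.band (tt >>> j) 1).toNat
def pvIdx (a : Nat) (q : List Nat) (k : Nat) : Nat :=
  ((List.range a).map (fun t => pvBitN k (q.getD t 0) <<< t)).sum
def pvANat (tt : Int) (a : Nat) (q : List Nat) : Nat :=
  (List.range (2^a)).foldl (fun acc k => acc ||| (pvBitT tt (pvIdx a q k) <<< k)) 0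
def pvSrc (v b j : Nat) : Nat :=
  ((j &&& (2^v - 1)) ||| (b <<< v)) ||| ((j >>> v) <<< (v + 1))
def pvCofN (t : Int) (v a b : Nat) : Nat :=
  (List.range (2^(a-1))).foldl (fun r j => r ||| (pvBitT t (pvSrc v b j) <<< j)) 0
def pvApplyN : Nat → Int → List Nat → Nat
  | 0, t, _ => pvBitT t 0
  | n+1, t, q =>
    let v := q.idxOf n
    let rest := q.take v ++ q.drop (v + 1)
    pvApplyN n ((pvCofN t v (n+1) 0 : Nat) : Int) rest |||
      (pvApplyN n ((pvCofN t v (n+1) 1 : Nat) : Int) rest <<< 2^n)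

-- basic bit facts
theorem pvBitN_eq (k j : Nat) : pvBitN k j = (k.testBit j).toNat := by
  simp [pvBitN, Nat.and_one_is_mod, Nat.toNat_testBit, Nat.shiftRight_eq_div_pow]

theorem pvBitT_le_one (tt : Int) (j : Nat) : pvBitT tt j ≤ 1 := by
  have h1 : PySem.Int.band (tt >>> j) 1 = PySem.Int.mod (tt >>> j) 2 := PySem.Int.band_one _
  have h2 := PySem.Int.mod_lt (tt >>> j) (b := 2) (by norm_num)
  have h3 := PySem.Int.mod_nonneg (tt >>> j) (b := 2) (by norm_num)
  simp only [pvBitT, h1]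
  omega

theorem pvBitT_cast (tt : Int) (j : Nat) :
    PySem.Int.band (tt >>> j) 1 = ((pvBitT tt j : Nat) : Int) := by
  have h1 : PySem.Int.band (tt >>> j) 1 = PySem.Int.mod (tt >>> j) 2 := PySem.Int.band_one _
  have h3 := PySem.Int.mod_nonneg (tt >>> j) (b := 2) (by norm_num)
  simp only [pvBitT, h1]
  omega

theorem pv_band_one_cast (k t : Nat) :
    PySem.Int.band (((k : Nat) : Int) >>> t) 1 = ((pvBitN k t : Nat) : Int) := by
  have h : ((k : Nat) : Int) >>> t = (((k >>> t : Nat) : Int)) := rfl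
  rw [h]
  have h1 : (1 : Int) = ((1 : Nat) : Int) := rfl
  rw [h1, PySem.Int.band_natCast]
  rfl

theorem pvBitT_natCast (k : Nat) (m : Nat) : pvBitT ((k : Nat) : Int) m = pvBitN k m := by
  unfold pvBitT
  rw [pv_band_one_cast k m, Int.toNat_natCast]

theorem pv_testBit_le_one {x m : Nat} (hx : x ≤ 1) (h : x.testBit m = true) :
    m = 0 ∧ x = 1 := by
  interval_cases x
  · simp at h
  · rcases Nat.eq_zero_or_pos m with hm | hm
    · exact ⟨hm, rfl⟩
    · have h2 : (1:Nat) < 2 ^ m := by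
        calc (1:Nat) < 2 := by omega
          _ = 2 ^ 1 := rfl
          _ ≤ 2 ^ m := Nat.pow_le_pow_right (by omega) hm
      rw [Nat.testBit_lt_two_pow h2] at h
      cases h

theorem pv_one_testBit (m : Nat) : (1:Nat).testBit m = decide (m = 0) := by
  by_cases h : m = 0
  · subst h; decide
  · simp only [h, decide_false]
    cases hb : (1:Nat).testBit m
    · rfl
    · exact absurd (pv_testBit_le_one (Nat.le_refl 1) hb).1 h

-- fold/cast commutation
theorem pv_foldl_bor_cast (l : List Nat) (g : Nat → Nat) (m : Nat) :
    (l.foldl (fun acc k => PySem.Int.bor acc ((g k : Nat) : Int)) ((m : Nat) : Int))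
      = (((l.foldl (fun acc k => acc ||| g k) m : Nat)) : Int) := by
  induction l generalizing m with
  | nil => rfl
  | cons x xs ih => simp only [List.foldl_cons, PySem.Int.bor_natCast]; exact ih _

theorem pv_foldl_bor_cast0 (l : List Nat) (g : Nat → Nat) :
    (l.foldl (fun acc k => PySem.Int.bor acc ((g k : Nat) : Int)) (0 : Int))
      = (((l.foldl (fun acc k => acc ||| g k) 0 : Nat)) : Int) := by
  have h := pv_foldl_bor_cast l g 0
  rw [show (((0 : Nat)) : Int) = (0 : Int) from rfl] at h
  exact h

-- testBit of an or-fold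
theorem pv_testBit_foldl_or (l : List Nat) (g : Nat → Nat) (m i : Nat) :
    ((l.foldl (fun acc k => acc ||| g k) m).testBit i)
      = (m.testBit i || l.any (fun k => (g k).testBit i)) := by
  induction l generalizing m with
  | nil => simp
  | cons x xs ih =>
    simp only [List.foldl_cons, List.any_cons, ih, Nat.testBit_or, Bool.or_assoc]

-- testBit of the canonical 'acc ||| (bit k <<< k)' fold over range
theorem pv_orfold_testBit (m : Nat) (g : Nat → Nat) (hg : ∀ k, g k ≤ 1) (i : Nat) :
    ((List.range m).foldl (fun acc k => acc ||| (g k <<< k)) 0).testBit i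
      = (decide (i < m) && decide (g i = 1)) := by
  rw [pv_testBit_foldl_or]
  simp only [Nat.zero_testBit, Bool.false_or]
  rw [Bool.eq_iff_iff, List.any_eq_true]
  constructor
  · rintro ⟨k, hkm, hT⟩
    rw [List.mem_range] at hkm
    rw [Nat.testBit_shiftLeft, Bool.and_eq_true, decide_eq_true_eq] at hT
    obtain ⟨hki, hbit⟩ := hT
    obtain ⟨hz, hone⟩ := pv_testBit_le_one (hg k) hbit
    have hik : k = i := by omega
    subst hik
    simp [hkm, hone]
  · intro h
    rw [Bool.and_eq_true, decide_eq_true_eq, decide_eq_true_eq] at h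
    refine ⟨i, List.mem_range.mpr h.1, ?_⟩
    rw [Nat.testBit_shiftLeft]
    simp [h.2]

-- sum of shifted bits: bound and digits
theorem pv_sum_bits_lt (a : Nat) (f : Nat → Bool) :
    ((List.range a).map (fun t => (f t).toNat <<< t)).sum < 2 ^ a := by
  induction a with
  | zero => simp
  | succ n ih =>
    rw [List.range_succ, List.map_append, List.sum_append, Nat.pow_succ]
    simp only [List.map_cons, List.map_nil, List.sum_cons, List.sum_nil, Nat.add_zero]
    have hterm : (f n).toNat <<< n ≤ 2 ^ n := by
      rw [Nat.shiftLeft_eq]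
      cases f n <;> simp
    omega

theorem pv_sum_bits_testBit (a : Nat) (f : Nat → Bool) (i : Nat) :
    (((List.range a).map (fun t => (f t).toNat <<< t)).sum).testBit i
      = (decide (i < a) && f i) := by
  induction a with
  | zero => simp
  | succ n ih =>
    rw [List.range_succ, List.map_append, List.sum_append]
    simp only [List.map_cons, List.map_nil, List.sum_cons, List.sum_nil, Nat.add_zero]
    have hlt := pv_sum_bits_lt n f
    have hsl : (f n).toNat <<< n = 2 ^ n * (f n).toNat := by
      rw [Nat.shiftLeft_eq, Nat.mul_comm]
    rw [hsl, Nat.add_comm, Nat.testBit_two_pow_mul_add _ hlt]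
    rcases Nat.lt_trichotomy i n with h | h | h
    · rw [if_pos h, ih]
      simp [h, Nat.lt_succ_of_lt h]
    · subst h
      rw [if_neg (Nat.lt_irrefl i), Nat.sub_self, Nat.testBit_bool_toNat]
      simp
    · have h1 : ¬ i < n := by omega
      have h2 : ¬ i < n + 1 := by omega
      rw [if_neg h1, Nat.testBit_bool_toNat]
      have h3 : i - n ≠ 0 := by omega
      simp [h2, h3]

-- pvIdx characterisation
theorem pvIdx_eq_sum (a : Nat) (q : List Nat) (k : Nat) :
    pvIdx a q k
      = ((List.range a).map (fun t => ((k.testBit (q.getD t 0)).toNat) <<< t)).sum := by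
  unfold pvIdx
  have h := List.map_congr_left (l := List.range a)
    (f := fun t => pvBitN k (q.getD t 0) <<< t)
    (g := fun t => (k.testBit (q.getD t 0)).toNat <<< t)
    (fun t _ => by simp only [pvBitN_eq])
  rw [h]

theorem pvIdx_lt (a : Nat) (q : List Nat) (k : Nat) : pvIdx a q k < 2 ^ a := by
  rw [pvIdx_eq_sum]; exact pv_sum_bits_lt a _

theorem pvIdx_testBit (a : Nat) (q : List Nat) (k i : Nat) :
    (pvIdx a q k).testBit i = (decide (i < a) && k.testBit (q.getD i 0)) := by
  rw [pvIdx_eq_sum]; exact pv_sum_bits_testBit a _ i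

-- permutation facts
theorem pv_perm_facts (a : Nat) (q : List Nat) (hq : q.Perm (List.range a)) :
    q.length = a ∧ (∀ t < a, q.getD t 0 < a)
      ∧ (∀ t1 < a, ∀ t2 < a, q.getD t1 0 = q.getD t2 0 → t1 = t2)
      ∧ (∀ i < a, ∃ t < a, q.getD t 0 = i) := by
  have hlen : q.length = a := by simpa using hq.length_eq
  have hnd : q.Nodup := hq.nodup_iff.mpr (List.nodup_range)
  have hmem : ∀ x, x ∈ q ↔ x < a := by
    intro x; rw [hq.mem_iff, List.mem_range]
  refine ⟨hlen, ?_, ?_, ?_⟩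
  · intro t ht
    have ht' : t < q.length := by omega
    rw [List.getD_eq_getElem q 0 ht']
    exact (hmem _).mp (q.getElem_mem ht')
  · intro t1 h1 t2 h2 heq
    have h1' : t1 < q.length := by omega
    have h2' : t2 < q.length := by omega
    rw [List.getD_eq_getElem q 0 h1', List.getD_eq_getElem q 0 h2'] at heq
    have h3 : (⟨t1, h1'⟩ : Fin q.length) = ⟨t2, h2'⟩ :=
      List.nodup_iff_injective_get.mp hnd (by simpa [List.get_eq_getElem] using heq)
    exact congrArg Fin.val h3
  · intro i hi
    have hmi : i ∈ q := (hmem i).mpr hi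
    obtain ⟨t, ht, hqt⟩ := List.getElem_of_mem hmi
    exact ⟨t, by omega, by rw [List.getD_eq_getElem q 0 ht]; exact hqt⟩

-- bit characterisation of A's Nat-level inner value
theorem pvANat_testBit (tt : Int) (a : Nat) (q : List Nat) (i : Nat) :
    (pvANat tt a q).testBit i
      = (decide (i < 2^a) && decide (pvBitT tt (pvIdx a q i) = 1)) :=
  pv_orfold_testBit (2^a) (fun k => pvBitT tt (pvIdx a q k)) (fun k => pvBitT_le_one tt _) i

-- bit characterisation of a cofactor
theorem pvCofN_testBit (t : Int) (v a b : Nat) (j : Nat) :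
    (pvCofN t v a b).testBit j
      = (decide (j < 2^(a-1)) && decide (pvBitT t (pvSrc v b j) = 1)) :=
  pv_orfold_testBit (2^(a-1)) (fun j => pvBitT t (pvSrc v b j)) (fun j => pvBitT_le_one t _) j

-- bits of pvSrc
theorem pvSrc_testBit (v b j t : Nat) (hb : b ≤ 1) :
    (pvSrc v b j).testBit t =
      if t < v then j.testBit t
      else if t = v then decide (b = 1)
      else j.testBit (t - 1) := by
  unfold pvSrc
  rw [Nat.testBit_or, Nat.testBit_or, Nat.testBit_and, Nat.testBit_two_pow_sub_one,
    Nat.testBit_shiftLeft, Nat.testBit_shiftLeft, Nat.testBit_shiftRight]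
  rcases Nat.lt_trichotomy t v with h | h | h
  · rw [if_pos h]
    have h1 : ¬ v ≤ t := by omega
    have h2 : ¬ v + 1 ≤ t := by omega
    simp [h, h1, h2]
  · subst h
    rw [if_neg (by omega), if_pos rfl]
    have h2 : ¬ t + 1 ≤ t := by omega
    have h3 : t - t = 0 := by omega
    interval_cases b <;> simp [h2, h3, pv_one_testBit]
  · rw [if_neg (by omega), if_neg (by omega)]
    have h1 : v ≤ t := by omega
    have h2 : v + 1 ≤ t := by omega
    have h3 : v + (t - (v + 1)) = t - 1 := by omega
    have h4 : b.testBit (t - v) = false := by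
      interval_cases b
      · simp
      · rw [pv_one_testBit]
        simp only [decide_eq_false_iff_not]
        omega
    simp [h1, h2, h3, h4]

-- the key index identity: the cofactor source index of the recursive call is A's gather index
theorem pvSrc_pvIdx (n : Nat) (q : List Nat) (hq : q.Perm (List.range (n+1)))
    (b r : Nat) (hb : b ≤ 1) (hr : r < 2^n) :
    pvSrc (q.idxOf n) b (pvIdx n (q.take (q.idxOf n) ++ q.drop (q.idxOf n + 1)) r)
      = pvIdx (n+1) q (2^n * b + r) := by
  obtain ⟨hlen, hran, hinj, hsur⟩ := pv_perm_facts (n+1) q hq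
  have hmem : n ∈ q := hq.mem_iff.mpr (List.mem_range.mpr (by omega))
  set v := q.idxOf n with hv
  have hvlt : v < q.length := List.idxOf_lt_length_of_mem hmem
  have hqv : q.getD v 0 = n := by
    rw [List.getD_eq_getElem q 0 hvlt]
    exact List.getElem_idxOf hvlt
  have hvn : v ≤ n := by omega
  set rest := q.take v ++ q.drop (v + 1) with hrest
  have htakelen : (q.take v).length = v := by
    rw [List.length_take]; omega
  have hrest_getD_lt : ∀ t, t < v → rest.getD t 0 = q.getD t 0 := by
    intro t ht
    rw [hrest, List.getD_append _ _ _ _ (by omega)]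
    have ht' : t < q.length := by omega
    rw [List.getD_eq_getElem _ 0 (by omega), List.getD_eq_getElem q 0 ht',
      List.getElem_take]
  have hrest_getD_ge : ∀ t, v ≤ t → t < n → rest.getD t 0 = q.getD (t+1) 0 := by
    intro t ht htn
    rw [hrest, List.getD_append_right _ _ _ _ (by rw [htakelen]; omega)]
    have hdlen : t - (q.take v).length < (q.drop (v+1)).length := by
      rw [htakelen, List.length_drop]; omega
    rw [List.getD_eq_getElem _ 0 hdlen, List.getElem_drop,
      List.getD_eq_getElem q 0 (by rw [List.length_drop] at hdlen; omega)]
    congr 1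
    rw [htakelen]; omega
  apply Nat.eq_of_testBit_eq
  intro t
  rw [pvSrc_testBit _ _ _ _ hb, pvIdx_testBit (n+1) q _ t,
    Nat.testBit_two_pow_mul_add _ hr]
  by_cases h1 : t < v
  · rw [if_pos h1]
    have htn : t < n + 1 := by omega
    have hqt_ne : q.getD t 0 ≠ n := by
      intro hc
      have := hinj t (by omega) v (by omega) (by rw [hc, hqv])
      omega
    have hqt_lt : q.getD t 0 < n := by
      have := hran t (by omega); omega
    rw [pvIdx_testBit n rest r t, hrest_getD_lt t h1, if_pos hqt_lt]
    simp [htn, show t < n from by omega]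
  · rw [if_neg h1]
    by_cases h2 : t = v
    · subst h2
      rw [if_pos rfl, hqv, if_neg (by omega)]
      have hns : n - n = 0 := by omega
      rw [hns]
      have htn : v < n + 1 := by omega
      interval_cases b <;> simp [htn, pv_one_testBit]
    · rw [if_neg h2]
      by_cases h3 : t < n + 1
      · have hqt_ne : q.getD t 0 ≠ n := by
          intro hc
          have := hinj t (by omega) v (by omega) (by rw [hc, hqv])
          omega
        have hqt_lt : q.getD t 0 < n := by
          have := hran t (by omega); omega
        rw [pvIdx_testBit n rest r (t-1), hrest_getD_ge (t-1) (by omega) (by omega)]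
        have ht1 : t - 1 + 1 = t := by omega
        rw [ht1, if_pos hqt_lt]
        simp [h3, show t - 1 < n from by omega]
      · have hfalse : (pvIdx n rest r).testBit (t - 1) = false := by
          rw [pvIdx_testBit]
          simp [show ¬ (t - 1 < n) from by omega]
        rw [hfalse]
        simp [h3]

-- rest is a permutation of range n
theorem pv_rest_perm (n : Nat) (q : List Nat) (hq : q.Perm (List.range (n+1))) :
    (q.take (q.idxOf n) ++ q.drop (q.idxOf n + 1)).Perm (List.range n) := by
  have h1 : q.take (q.idxOf n) ++ q.drop (q.idxOf n + 1) = q.eraseIdx (q.idxOf n) :=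
    (List.eraseIdx_eq_take_drop_succ q _).symm
  have h2 : q.eraseIdx (q.idxOf n) = q.erase n :=
    (List.erase_eq_eraseIdx_of_idxOf rfl).symm
  rw [h1, h2]
  have h3 : (q.erase n).Perm ((List.range (n+1)).erase n) := hq.erase n
  have h4 : (List.range (n+1)).erase n = List.range n := by
    rw [List.range_succ, List.erase_append_right _ (by simp), List.erase_cons_head]
    simp
  rwa [h4] at h3

-- the recursive Shannon build equals A's gather table (Nat level)
theorem pvApplyN_testBit : ∀ (n : Nat) (t : Int) (q : List Nat),
    q.Perm (List.range n) → ∀ i,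
    (pvApplyN n t q).testBit i
      = (decide (i < 2^n) && decide (pvBitT t (pvIdx n q i) = 1)) := by
  intro n
  induction n with
  | zero =>
    intro t q hq i
    have hIdx : pvIdx 0 q i = 0 := by simp [pvIdx]
    show (pvBitT t 0).testBit i = _
    rw [hIdx]
    have hle := pvBitT_le_one t 0
    interval_cases h : pvBitT t 0
    · simp
    · rw [pv_one_testBit]
      by_cases hi : i = 0
      · subst hi; simp
      · simp [hi, show ¬ i < 1 from by omega]
  | succ n ih =>
    intro t q hq i
    have hrestp := pv_rest_perm n q hq
    show (pvApplyN n ((pvCofN t (q.idxOf n) (n+1) 0 : Nat) : Int)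
            (q.take (q.idxOf n) ++ q.drop (q.idxOf n + 1)) |||
          (pvApplyN n ((pvCofN t (q.idxOf n) (n+1) 1 : Nat) : Int)
            (q.take (q.idxOf n) ++ q.drop (q.idxOf n + 1)) <<< 2^n)).testBit i = _
    rw [Nat.testBit_or, Nat.testBit_shiftLeft, ih _ _ hrestp i, ih _ _ hrestp (i - 2^n)]
    simp only [pvBitT_natCast, pvBitN_eq, pvCofN_testBit, Nat.add_sub_cancel]
    by_cases h1 : i < 2^n
    · have hkey := pvSrc_pvIdx n q hq 0 i (by omega) h1
      rw [Nat.mul_zero, Nat.zero_add] at hkey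
      have hmlt : pvIdx n (q.take (q.idxOf n) ++ q.drop (q.idxOf n + 1)) i < 2^n :=
        pvIdx_lt n _ i
      rw [hkey]
      have h2 : ¬ 2^n ≤ i := by omega
      have hi2 : i < 2^(n+1) := by
        have : (2:Nat)^n ≤ 2^(n+1) := Nat.pow_le_pow_right (by omega) (by omega)
        omega
      simp [h1, h2, hi2, hmlt, Bool.toNat_eq_one]
    · by_cases h3 : i < 2^(n+1)
      · have hr : i - 2^n < 2^n := by
          have : (2:Nat)^(n+1) = 2^n + 2^n := by ring
          omega
        have hkey := pvSrc_pvIdx n q hq 1 (i - 2^n) (by omega) hr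
        have hi' : 2^n * 1 + (i - 2^n) = i := by omega
        rw [hi'] at hkey
        have hmlt : pvIdx n (q.take (q.idxOf n) ++ q.drop (q.idxOf n + 1)) (i - 2^n)
            < 2^n := pvIdx_lt n _ _
        rw [hkey]
        simp [h1, h3, hr, hmlt, show 2^n ≤ i from by omega, Bool.toNat_eq_one]
      · have hr : ¬ (i - 2^n < 2^n) := by
          have : (2:Nat)^(n+1) = 2^n + 2^n := by ring
          omega
        simp [h1, hr, h3]

theorem pvApplyN_eq_pvANat (n : Nat) (t : Int) (q : List Nat)
    (hq : q.Perm (List.range n)) : pvApplyN n t q = pvANat t n q := by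
  apply Nat.eq_of_testBit_eq
  intro i
  rw [pvApplyN_testBit n t q hq i, pvANat_testBit]

-- helper cast lemmas for the bridges
theorem pv_pyRange0 (n : Nat) :
    PySem.List.pyRange 0 (n : Int) 1 = (List.range n).map (fun (k : Nat) => (k : Int)) := by
  rw [PySem.List.pyRange_one]
  have h1 : ((n : Int) - 0).toNat = n := by omega
  rw [h1]
  apply List.map_congr_left
  intro k _
  omega

theorem pv_map_cast_sum (f : Nat → Nat) (l : List Nat) :
    (l.map (fun t => ((f t : Nat) : Int))).sum = (((l.map f).sum : Nat) : Int) := by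
  induction l with
  | nil => rfl
  | cons x xs ih =>
    simp only [List.map_cons, List.sum_cons, ih]
    push_cast
    ring

theorem pv_band_one_cast' (k t : Nat) :
    PySem.Int.band (((k : Nat) : Int) >>> ((t : Nat) : Int)) 1 = ((pvBitN k t : Nat) : Int) := by
  rw [Int.shiftRight_natCast_right]
  exact pv_band_one_cast k t

theorem pvBitT_cast' (tt : Int) (j : Nat) :
    PySem.Int.band (tt >>> ((j : Nat) : Int)) 1 = ((pvBitT tt j : Nat) : Int) := by
  rw [Int.shiftRight_natCast_right]
  exact pvBitT_cast tt j

theorem pv_getD_map_cast (q : List Nat) (t : Nat) (ht : t < q.length) :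
    (q.map (fun (x : Nat) => (x : Int))).getD t 0 = ((q.getD t 0 : Nat) : Int) := by
  have h1 : t < (q.map (fun (x : Nat) => (x : Int))).length := by simpa using ht
  rw [List.getD_eq_getElem _ _ h1, List.getElem_map, List.getD_eq_getElem _ _ ht]

theorem pv_getD_map_range (g : Nat → Int) (a j : Nat) (hj : j < a) :
    ((List.range a).map g).getD j 0 = g j := by
  have h1 : j < ((List.range a).map g).length := by simpa using hj
  rw [List.getD_eq_getElem _ _ h1, List.getElem_map, List.getElem_range]

-- bridge from the Int port of A to the Nat view
theorem pvA_bridge (tt : Int) (a : Nat) (q : List Nat)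
    (hq : q.Perm (List.range a)) :
    pvA_newtt tt (a : Int) (q.map (fun (x : Nat) => (x : Int)))
      = ((pvANat tt a q : Nat) : Int) := by
  obtain ⟨hlen, hran, _, _⟩ := pv_perm_facts a q hq
  unfold pvA_newtt
  have h2 : ((1:Int) <<< ((a : Int)).toNat) = (((2^a : Nat)) : Int) := by
    rw [Int.toNat_natCast]
    calc (1:Int) <<< a = ((((1:Nat) <<< a : Nat)) : Int) := rfl
      _ = (((2^a : Nat)) : Int) := by rw [Nat.one_shiftLeft]
  rw [h2, pv_pyRange0 (2^a), List.foldl_map]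
  unfold pvANat
  rw [← pv_foldl_bor_cast0 (List.range (2^a)) (fun k => pvBitT tt (pvIdx a q k) <<< k)]
  apply PySem.List.foldl_congr_mem
  intro acc k _
  simp only [Int.shiftLeft_natCast_right, Int.shiftRight_natCast_right, Int.toNat_natCast]
  have hinputs :
      (PySem.List.pyRange 0 (a : Int) 1).map
          (fun i => PySem.Int.band (((k : Nat) : Int) >>> i.toNat) 1)
        = (List.range a).map (fun (t : Nat) => ((pvBitN k t : Nat) : Int)) := by
    rw [pv_pyRange0 a, List.map_map]
    apply List.map_congr_left
    intro t _
    simp only [Function.comp_apply, Int.toNat_natCast]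
    first
      | exact pv_band_one_cast k t
      | exact pv_band_one_cast' k t
  simp only [Int.shiftLeft_natCast_right, Int.shiftRight_natCast_right,
    Int.toNat_natCast] at hinputs
  rw [hinputs]
  have hpermuted :
      (PySem.List.pyRange 0 (a : Int) 1).map
          (fun i => PySem.List.pyGetD
            ((List.range a).map (fun (t : Nat) => ((pvBitN k t : Nat) : Int)))
            (PySem.List.pyGetD (q.map (fun (x : Nat) => (x : Int))) i 0) 0)
        = (List.range a).map (fun (t : Nat) => ((pvBitN k (q.getD t 0) : Nat) : Int)) := by
    rw [pv_pyRange0 a, List.map_map]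
    apply List.map_congr_left
    intro t htm
    rw [List.mem_range] at htm
    simp only [Function.comp_apply]
    rw [PySem.List.pyGetD_natCast, pv_getD_map_cast q t (by omega),
      PySem.List.pyGetD_natCast, pv_getD_map_range _ a (q.getD t 0) (hran t htm)]
  simp only [Int.shiftLeft_natCast_right, Int.shiftRight_natCast_right,
    Int.toNat_natCast] at hpermuted
  rw [hpermuted]
  have horig :
      ((PySem.List.pyRange 0 (a : Int) 1).map
          (fun i => PySem.List.pyGetD
            ((List.range a).map (fun (t : Nat) => ((pvBitN k (q.getD t 0) : Nat) : Int)))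
            i 0 <<< i.toNat)).sum
        = ((pvIdx a q k : Nat) : Int) := by
    rw [pv_pyRange0 a, List.map_map]
    have hmap :
        (List.range a).map
            ((fun i => PySem.List.pyGetD
              ((List.range a).map (fun (t : Nat) => ((pvBitN k (q.getD t 0) : Nat) : Int)))
              i 0 <<< i.toNat) ∘ (fun (x : Nat) => (x : Int)))
          = (List.range a).map (fun (t : Nat) => (((pvBitN k (q.getD t 0) <<< t : Nat)) : Int)) := by
      apply List.map_congr_left
      intro t htm
      rw [List.mem_range] at htm
      simp only [Function.comp_apply, Int.toNat_natCast]
      rw [PySem.List.pyGetD_natCast, pv_getD_map_range _ a t htm]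
      first
        | rfl
        | (rw [Int.shiftLeft_natCast_right]; rfl)
    rw [hmap, pv_map_cast_sum (fun t => pvBitN k (q.getD t 0) <<< t) (List.range a)]
    rfl
  simp only [Int.shiftLeft_natCast_right, Int.shiftRight_natCast_right,
    Int.toNat_natCast] at horig
  rw [horig]
  simp only [Int.toNat_natCast]
  first
    | rw [pvBitT_cast tt (pvIdx a q k)]
    | rw [pvBitT_cast' tt (pvIdx a q k)]
  first
    | rfl
    | (rw [Int.shiftLeft_natCast_right]; rfl)

-- index? on a cast list
theorem pv_index?_map_cast (q : List Nat) (x : Nat) (hx : x ∈ q) :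
    PySem.List.index? (q.map (fun (k : Nat) => (k : Int))) ((x : Nat) : Int)
      = some (q.idxOf x) := by
  induction q with
  | nil => cases hx
  | cons y ys ih =>
    by_cases hxy : y = x
    · subst hxy
      simp only [List.map_cons]
      rw [PySem.List.index?_cons_self]
      rw [List.idxOf_cons_self]
    · simp only [List.map_cons]
      rw [PySem.List.index?_cons_of_ne _ (by
        intro hc
        exact hxy (by exact_mod_cast hc))]
      have hx' : x ∈ ys := by
        rcases List.mem_cons.mp hx with h | h
        · exact absurd h.symm hxy
        · exact h
      rw [ih hx', List.idxOf_cons_ne _ (by exact hxy)]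
      rfl

-- bridge from the Int port of the cofactor to the Nat view
theorem pvB_cof_bridge (t : Int) (v a b : Nat) (ha : 1 ≤ a) :
    pvB_cof t (v : Int) (a : Int) ((b : Nat) : Int)
      = ((pvCofN t v a b : Nat) : Int) := by
  unfold pvB_cof
  have h1 : ((a : Int) - 1).toNat = a - 1 := by omega
  have h2 : ((1:Int) <<< (a - 1)) = (((2^(a-1) : Nat)) : Int) := by
    calc (1:Int) <<< (a-1) = ((((1:Nat) <<< (a-1) : Nat)) : Int) := rfl
      _ = (((2^(a-1) : Nat)) : Int) := by rw [Nat.one_shiftLeft]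
  rw [h1, h2, pv_pyRange0 (2^(a-1)), List.foldl_map]
  unfold pvCofN
  rw [← pv_foldl_bor_cast0 (List.range (2^(a-1))) (fun j => pvBitT t (pvSrc v b j) <<< j)]
  apply PySem.List.foldl_congr_mem
  intro acc j _
  have hv : ((v : Int)).toNat = v := Int.toNat_natCast v
  have hv1 : ((v : Int) + 1).toNat = v + 1 := by omega
  rw [hv, hv1]
  have hmask : ((1:Int) <<< v) - 1 = (((2^v - 1 : Nat)) : Int) := by
    have : (1:Int) <<< v = (((2^v : Nat)) : Int) := by
      calc (1:Int) <<< v = ((((1:Nat) <<< v : Nat)) : Int) := rfl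
        _ = (((2^v : Nat)) : Int) := by rw [Nat.one_shiftLeft]
    rw [this]
    have hp : 1 ≤ 2^v := Nat.one_le_two_pow
    push_cast [hp]
    ring
  have hband : PySem.Int.band ((j : Nat) : Int) (((2^v - 1 : Nat)) : Int)
      = (((j &&& (2^v - 1) : Nat)) : Int) := PySem.Int.band_natCast j _
  have hbshift : ((b : Nat) : Int) <<< v = (((b <<< v : Nat)) : Int) := rfl
  have hjshift : (((j : Nat) : Int) >>> v) <<< (v + 1)
      = ((((j >>> v) <<< (v + 1) : Nat)) : Int) := rfl
  have hsrc :
      PySem.Int.bor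
          (PySem.Int.bor (PySem.Int.band ((j:Nat):Int) (((1:Int) <<< v) - 1))
            (((b:Nat):Int) <<< v))
          ((((j:Nat):Int) >>> v) <<< (v + 1))
        = ((pvSrc v b j : Nat) : Int) := by
    rw [hmask, hband, hbshift, PySem.Int.bor_natCast, hjshift, PySem.Int.bor_natCast]
    rfl
  show PySem.Int.bor acc
      (PySem.Int.band (t >>> (PySem.Int.bor
        (PySem.Int.bor (PySem.Int.band ((j:Nat):Int) (((1:Int) <<< v) - 1)) (((b:Nat):Int) <<< v))
        ((((j:Nat):Int)) >>> v <<< (v + 1))).toNat) 1 <<< j)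
    = PySem.Int.bor acc (((pvBitT t (pvSrc v b j) <<< j : Nat) : Int))
  rw [hsrc, Int.toNat_natCast, pvBitT_cast t (pvSrc v b j)]
  rfl

-- bridge from the Int port of apply to the Nat view
theorem pvB_applyAux_bridge : ∀ (n : Nat) (t : Int) (q : List Nat),
    q.Perm (List.range n) →
    pvB_applyAux n t (q.map (fun (x : Nat) => (x : Int)))
      = ((pvApplyN n t q : Nat) : Int) := by
  intro n
  induction n with
  | zero =>
    intro t q hq
    show PySem.Int.band t 1 = _
    show PySem.Int.band t 1 = ((pvBitT t 0 : Nat) : Int)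
    have h0 : t >>> (0 : Nat) = t := by
      simp [Int.shiftRight_eq_div_pow]
    rw [← pvBitT_cast t 0, h0]
  | succ n ih =>
    intro t q hq
    have hlen : q.length = n + 1 := by simpa using hq.length_eq
    have hmem : n ∈ q := hq.mem_iff.mpr (List.mem_range.mpr (by omega))
    have hrestp := pv_rest_perm n q hq
    show pvB_applyAux (n+1) t (q.map (fun (x : Nat) => (x : Int))) = _
    unfold pvB_applyAux
    simp only []
    have hlenc : ((q.map (fun (x : Nat) => (x : Int))).length : Int) = ((n+1 : Nat) : Int) := by
      simp [hlen]
    rw [hlenc]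
    have ha1 : ((n+1 : Nat) : Int) - 1 = ((n : Nat) : Int) := by push_cast; ring
    rw [ha1, pv_index?_map_cast q n hmem]
    set v := q.idxOf n with hvdef
    have hvlt : v < q.length := List.idxOf_lt_length_of_mem hmem
    simp only [Option.getD_some]
    have hslice1 : PySem.List.slice (q.map (fun (x : Nat) => (x : Int))) none
        (some ((v : Nat) : Int)) = (q.take v).map (fun (x : Nat) => (x : Int)) := by
      rw [PySem.List.slice_to_natCast, List.map_take]
    have hslice2 : PySem.List.slice (q.map (fun (x : Nat) => (x : Int)))
        (some (((v : Nat) : Int) + 1)) none = (q.drop (v+1)).map (fun (x : Nat) => (x : Int)) := by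
      have : ((v : Nat) : Int) + 1 = (((v + 1 : Nat)) : Int) := by push_cast; ring
      rw [this, PySem.List.slice_from_natCast, List.map_drop]
    rw [hslice1, hslice2, ← List.map_append]
    have hhalf : ((1:Int) <<< (((n : Nat) : Int)).toNat).toNat = 2^n := by
      rw [Int.toNat_natCast]
      have h1n : (1:Int) <<< n = ((((1:Nat) <<< n : Nat)) : Int) := rfl
      rw [h1n, Nat.one_shiftLeft, Int.toNat_natCast]
    rw [hhalf]
    have hc0 : pvB_cof t ((v : Nat) : Int) ((n+1 : Nat) : Int) 0
        = ((pvCofN t v (n+1) 0 : Nat) : Int) := by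
      have := pvB_cof_bridge t v (n+1) 0 (by omega)
      simpa using this
    have hc1 : pvB_cof t ((v : Nat) : Int) ((n+1 : Nat) : Int) 1
        = ((pvCofN t v (n+1) 1 : Nat) : Int) := by
      have := pvB_cof_bridge t v (n+1) 1 (by omega)
      simpa using this
    rw [hc0, hc1, ih _ _ hrestp, ih _ _ hrestp]
    have hsh : (((pvApplyN n ((pvCofN t v (n+1) 1 : Nat) : Int)
        (q.take v ++ q.drop (v+1)) : Nat)) : Int) <<< (2^n : Nat)
        = (((pvApplyN n ((pvCofN t v (n+1) 1 : Nat) : Int)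
          (q.take v ++ q.drop (v+1)) <<< 2^n : Nat)) : Int) := rfl
    rw [hsh, PySem.Int.bor_natCast]
    rfl

-- per-perm equality at the Int level
theorem pv_newtt_eq (tt arity : Int) (h : 0 ≤ arity) (perm : List Int)
    (hp : perm ∈ PySem.List.permutations (PySem.List.pyRange 0 arity 1)
      (PySem.List.pyRange 0 arity 1).length) :
    pvB_apply tt perm = pvA_newtt tt arity perm := by
  have hperm : perm.Perm (PySem.List.pyRange 0 arity 1) :=
    PySem.List.perm_of_mem_permutations hp
  have harity : arity = ((arity.toNat : Nat) : Int) := (Int.toNat_of_nonneg h).symm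
  set a := arity.toNat with ha
  rw [harity] at hperm ⊢
  rw [pv_pyRange0 a] at hperm
  have hnonneg : ∀ x ∈ perm, 0 ≤ x := by
    intro x hx
    have hx2 := hperm.mem_iff.mp hx
    rw [List.mem_map] at hx2
    obtain ⟨y, _, hy⟩ := hx2
    omega
  set q : List Nat := perm.map Int.toNat with hqdef
  have hperm_eq : perm = q.map (fun (x : Nat) => (x : Int)) := by
    rw [hqdef, List.map_map]
    symm
    calc List.map ((fun (x : Nat) => (x : Int)) ∘ Int.toNat) perm
        = List.map id perm := by
          apply List.map_congr_left
          intro x hx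
          simp only [Function.comp_apply, id]
          exact Int.toNat_of_nonneg (hnonneg x hx)
      _ = perm := List.map_id perm
  have hqperm : q.Perm (List.range a) := by
    have h1 := hperm.map Int.toNat
    rw [List.map_map] at h1
    have hcomp : List.map (Int.toNat ∘ (fun (k : Nat) => (k : Int))) (List.range a)
        = List.map id (List.range a) := by
      apply List.map_congr_left
      intro x _
      simp
    rw [hcomp, List.map_id] at h1
    exact h1
  have hqlen : q.length = a := by simpa using hqperm.length_eq
  have hplen : perm.length = a := by
    rw [hperm_eq, List.length_map, hqlen]
  unfold pvB_apply
  rw [hplen, hperm_eq, pvB_applyAux_bridge a tt q hqperm,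
    pvA_bridge tt a q hqperm, pvApplyN_eq_pvANat a tt q hqperm]

-- dict-fold vs (set, list)-fold
theorem pv_dictset_fold (f : List Int → Int) (l : List (List Int))
    (d : PySem.Dict Int (List Int)) (hnd : d.keys.Nodup) :
    (l.foldl (fun d x => if d.contains (f x) then d else d.insert (f x) x) d).values
      = (l.foldl (fun st x => if PySem.Set.contains st.1 (f x) then st
          else (PySem.Set.add st.1 (f x), st.2 ++ [x])) (d.keys, d.values)).2 := by
  induction l generalizing d with
  | nil => rfl
  | cons x xs ih =>
    simp only [List.foldl_cons]
    by_cases hm : f x ∈ d.keys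
    · rw [if_pos ((PySem.Dict.contains_iff_mem_keys _ _).mpr hm),
        if_pos ((PySem.Set.contains_iff _ _).mpr hm)]
      exact ih d hnd
    · have hc1 : d.contains (f x) = false := by
        rw [← Bool.not_eq_true]
        exact fun hcon => hm ((PySem.Dict.contains_iff_mem_keys _ _).mp hcon)
      have hc2 : PySem.Set.contains d.keys (f x) = false := by
        rw [← Bool.not_eq_true]
        exact fun hcon => hm ((PySem.Set.contains_iff _ _).mp hcon)
      rw [if_neg (by rw [hc1]; exact Bool.false_ne_true),
        if_neg (by rw [hc2]; exact Bool.false_ne_true)]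
      have hkeys : (d.insert (f x) x).keys = d.keys ++ [f x] :=
        PySem.Dict.keys_insert_of_not_contains d x hc1
      have hvals : (d.insert (f x) x).values = d.values ++ [x] := by
        simp only [PySem.Dict.values, PySem.Dict.items_insert_of_not_contains d x hc1,
          List.map_append]
        rfl
      have hadd : PySem.Set.add d.keys (f x) = d.keys ++ [f x] :=
        PySem.Set.add_of_not_mem hm
      have hnd2 : (d.insert (f x) x).keys.Nodup := by
        rw [hkeys]
        refine List.Nodup.append hnd (List.nodup_singleton _) ?_
        intro y hy hz
        rw [List.mem_singleton] at hz
        subst hz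
        exact hm hy
      rw [ih _ hnd2, hkeys, hvals, hadd]

-- ===== VERDICT (by name: the statement is the Claim_ definition above) =====
theorem canonical_perms_py_spec : Claim_equal_canonical_perms_py := by
  intro tt arity hdom hpre
  have hpre2 : 0 ≤ arity := hpre
  unfold Spec_canonical_perms_py canonical_perms_py canonical_perms_py_alt
  have hcong :
      (PySem.List.permutations (PySem.List.pyRange 0 arity 1)
        (PySem.List.pyRange 0 arity 1).length).foldl
        (fun (st : PySem.Set Int × List (List Int)) perm =>
          if PySem.Set.contains st.1 (pvB_apply tt perm) then st
          else (PySem.Set.add st.1 (pvB_apply tt perm), st.2 ++ [perm]))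
        (PySem.Set.empty, [])
      = (PySem.List.permutations (PySem.List.pyRange 0 arity 1)
        (PySem.List.pyRange 0 arity 1).length).foldl
        (fun (st : PySem.Set Int × List (List Int)) perm =>
          if PySem.Set.contains st.1 (pvA_newtt tt arity perm) then st
          else (PySem.Set.add st.1 (pvA_newtt tt arity perm), st.2 ++ [perm]))
        (PySem.Set.empty, []) := by
    apply PySem.List.foldl_congr_mem
    intro st perm hpm
    rw [pv_newtt_eq tt arity hpre2 perm hpm]
  rw [hcong]
  have hstart : ((PySem.Set.empty : PySem.Set Int), ([] : List (List Int)))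
      = ((PySem.Dict.empty : PySem.Dict Int (List Int)).keys,
         (PySem.Dict.empty : PySem.Dict Int (List Int)).values) := rfl
  rw [hstart]
  exact pv_dictset_fold (pvA_newtt tt arity) _ PySem.Dict.empty
    PySem.Dict.nodup_keys_empty
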